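-- pv_equiv track=rewrite | github.com/Accessible-Technology-in-Sign/PopSign | Assets/PopSignMain/Scripts/Python/generate_levels_new.py | checkSmallIslands
-- ===== SOURCE A (Python) =====
-- def checkSmallIslands(level_layout, x, y):
--
--     if  x < 0 or y < 0 or x >= len(level_layout) or y >= len(level_layout[0]):
--         return False
--     if level_layout[x][y] == '0':
--         return False
--     island_size_threshold = 5
--     visited = [[False for i in range(len(level_layout[0]))] for j in range(len(level_layout))]
--     return countIslandSize(level_layout, x, y, visited) < island_size_threshold
--
-- def countIslandSize(level_layout, x, y, visited):
--     if  x < 0 or y < 0 or x >= len(level_layout) or y >= len(level_layout[0]) or level_layout[x][y] == '0' or visited[x][y]: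
--         return 0
--     else:
--         visited[x][y] = True
--         return 1 + countIslandSize(level_layout, x + 1, y, visited) + countIslandSize(level_layout, x, y+1, visited) + countIslandSize(level_layout, x, y - 1, visited) + countIslandSize(level_layout, x - 1, y, visited)
-- ===== SOURCE B (Python) =====
-- def checkSmallIslands(level_layout, x, y):
--     if x < 0 or y < 0 or x >= len(level_layout) or y >= len(level_layout[0]):
--         return False
--     if level_layout[x][y] == '0':
--         return False
--     rows = len(level_layout)
--     cols = len(level_layout[0])
--     visited = [[False] * cols for _ in range(rows)]
--     count = 0
--     stack = [(x, y)]
--     while stack: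
--         cx, cy = stack.pop()
--         if cx < 0 or cy < 0 or cx >= rows or cy >= cols or level_layout[cx][cy] == '0' or visited[cx][cy]:
--             continue
--         visited[cx][cy] = True
--         count += 1
--         stack.extend([(cx - 1, cy), (cx, cy - 1), (cx, cy + 1), (cx + 1, cy)])
--     return count < 5
-- ===== Notes on version B (the rewrite author's own statement) =====
-- stated objective: alternative
-- what changed: The recursive four-way flood-fill helper countIslandSize (which threads a mutated visited matrix through nested recursive calls) is replaced by an iterative flood fill with an explicit stack inside checkSmallIslands: pop a cell, skip it if out of bounds / water / visited, else mark it, count it and push its four neighbours; the guards and the final 'count < 5' are unchanged, and no recursion-depth limit applies.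
-- outside the precondition, e.g. on checkSmallIslands(['10', '0'], 0, 0): A returns True, B returns True
import Mathlib
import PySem

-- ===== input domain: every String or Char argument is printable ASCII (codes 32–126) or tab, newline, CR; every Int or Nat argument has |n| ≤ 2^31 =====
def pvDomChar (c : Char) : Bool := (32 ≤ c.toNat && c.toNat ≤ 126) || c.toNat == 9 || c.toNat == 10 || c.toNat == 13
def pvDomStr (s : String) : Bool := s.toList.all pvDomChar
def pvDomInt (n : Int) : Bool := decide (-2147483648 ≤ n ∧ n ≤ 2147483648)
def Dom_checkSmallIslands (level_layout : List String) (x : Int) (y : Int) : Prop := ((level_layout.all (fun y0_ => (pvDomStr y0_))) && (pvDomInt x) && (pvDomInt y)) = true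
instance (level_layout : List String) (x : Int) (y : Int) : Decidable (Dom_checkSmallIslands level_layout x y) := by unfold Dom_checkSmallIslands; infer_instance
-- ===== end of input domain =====

-- B replaces A's recursive flood-fill helper by an iterative explicit-stack flood fill (alternative
-- decomposition, same asymptotic cost); equality of the returned Bool is proved under Pre_.

-- ===== PORT A =====
-- len(level_layout[0]) (only evaluated behind the guards, where it is in range)
def colsOf (level_layout : List String) : Nat := (level_layout.headD "").toList.length

-- level_layout[x][y]; the .getD defaults are exact under Pre_: both indexes are in range behind the guards
def gridAt (level_layout : List String) (x : Int) (y : Int) : Char :=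
  (PySem.Str.pyGet? ((PySem.List.pyGet? level_layout x).getD "") y).getD ' '

-- visited[x][y]; exact behind the guards (visited is a rows × cols matrix)
def visAt (v : List (List Bool)) (x : Int) (y : Int) : Bool :=
  (PySem.List.pyGet? ((PySem.List.pyGet? v x).getD []) y).getD false

-- visited[x][y] = True; exact behind the guards (0 ≤ x, y and both in range there)
def visMark (v : List (List Bool)) (x : Int) (y : Int) : List (List Bool) :=
  v.set x.toNat ((v.getD x.toNat []).set y.toNat true)

-- the guard of countIslandSize, in Python's order
def isBad (level_layout : List String) (x : Int) (y : Int) (v : List (List Bool)) : Bool :=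
  decide (x < 0) || decide (y < 0) || decide ((level_layout.length : Int) ≤ x) ||
    decide ((colsOf level_layout : Int) ≤ y) || (gridAt level_layout x y == '0') || visAt v x y

-- countIslandSize; the fuel only makes the recursion total (it is never exhausted with the fuel
-- checkSmallIslands supplies); returns (count, visited) since Python mutates visited in place
def countIslandSizeF (level_layout : List String) (fuel : Nat) (x : Int) (y : Int)
    (v : List (List Bool)) : Int × List (List Bool) :=
  match fuel with
  | 0 => (0, v)
  | fuel + 1 =>
    if isBad level_layout x y v then (0, v)
    else
      let v0 := visMark v x y
      let r1 := countIslandSizeF level_layout fuel (x + 1) y v0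
      let r2 := countIslandSizeF level_layout fuel x (y + 1) r1.2
      let r3 := countIslandSizeF level_layout fuel x (y - 1) r2.2
      let r4 := countIslandSizeF level_layout fuel (x - 1) y r3.2
      (1 + r1.1 + r2.1 + r3.1 + r4.1, r4.2)

def checkSmallIslands (level_layout : List String) (x : Int) (y : Int) : Bool :=
  if decide (x < 0) || decide (y < 0) || decide ((level_layout.length : Int) ≤ x) ||
      decide ((colsOf level_layout : Int) ≤ y) then false
  else if gridAt level_layout x y == '0' then false
  else
    let visited := (List.range level_layout.length).map
      (fun _ => (List.range (colsOf level_layout)).map (fun _ => false))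
    decide ((countIslandSizeF level_layout (level_layout.length * colsOf level_layout + 1)
      x y visited).1 < 5)

-- ===== PORT B =====
-- the while loop of Source B; the stack is modelled top-first (Python pushes/pops at the list's end);
-- the fuel only makes the loop total (never exhausted with the fuel checkSmallIslands_alt supplies)
def stackLoopF (level_layout : List String) : Nat → List (List Bool) → Int → List (Int × Int) → Int
  | _, _, count, [] => count
  | 0, _, count, _ :: _ => count
  | fuel + 1, v, count, (cx, cy) :: rest =>
    if isBad level_layout cx cy v then stackLoopF level_layout fuel v count rest
    else
      stackLoopF level_layout fuel (visMark v cx cy) (count + 1)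
        ((cx + 1, cy) :: (cx, cy + 1) :: (cx, cy - 1) :: (cx - 1, cy) :: rest)

def checkSmallIslands_alt (level_layout : List String) (x : Int) (y : Int) : Bool :=
  if decide (x < 0) || decide (y < 0) || decide ((level_layout.length : Int) ≤ x) ||
      decide ((colsOf level_layout : Int) ≤ y) then false
  else if gridAt level_layout x y == '0' then false
  else
    let visited := (List.range level_layout.length).map
      (fun _ => List.replicate (colsOf level_layout) false)
    decide (stackLoopF level_layout (4 * (level_layout.length * colsOf level_layout) + 2)
      visited 0 [(x, y)] < 5)

-- ===== PRECONDITION & SPEC =====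
-- Pre_ excludes in-bounds starting cells of ragged grids having a row shorter than row 0: there the
-- flood fill can index past a row's end and A raises IndexError; on some such inputs the short row
-- is never reached and A still returns (see the cite in claim.json) — they are excluded all the same.
def Pre_checkSmallIslands (level_layout : List String) (x : Int) (y : Int) : Prop :=
  (x < 0 ∨ y < 0 ∨ (level_layout.length : Int) ≤ x ∨ ((level_layout.headD "").toList.length : Int) ≤ y)
  ∨ (∀ s ∈ level_layout, (level_layout.headD "").toList.length ≤ s.toList.length)
instance (level_layout : List String) (x : Int) (y : Int) : Decidable (Pre_checkSmallIslands level_layout x y) := by unfold Pre_checkSmallIslands; infer_instance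
def pvWitness_checkSmallIslands : List String × Int × Int := (["11", "11"], 0, 0)

def Spec_checkSmallIslands (level_layout : List String) (x : Int) (y : Int) (out : Bool) : Prop := out = checkSmallIslands_alt level_layout x y
instance (level_layout : List String) (x : Int) (y : Int) (out : Bool) : Decidable (Spec_checkSmallIslands level_layout x y out) := by unfold Spec_checkSmallIslands; infer_instance

-- ===== CLAIM (what is proved, stated in full; the proofs are below) =====
def Claim_equal_checkSmallIslands : Prop := ∀ (level_layout : List String) (x : Int) (y : Int), Dom_checkSmallIslands level_layout x y → Pre_checkSmallIslands level_layout x y → Spec_checkSmallIslands level_layout x y (checkSmallIslands level_layout x y)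

-- ===== LEMMAS AND PROOFS =====

-- visited keeps the rows × cols shape of the grid
def pvShape (L : List String) (v : List (List Bool)) : Prop :=
  v.length = L.length ∧ ∀ r ∈ v, r.length = colsOf L

-- number of unvisited cells: the fuel measure shared by both flood fills
def pvFalses (v : List (List Bool)) : Nat := (v.map (fun r => r.count false)).sum

-- A's recursion run with (always sufficient) fuel pvFalses v + 1
def pvCis (L : List String) (p : Int × Int) (v : List (List Bool)) : Int × List (List Bool) :=
  countIslandSizeF L (pvFalses v + 1) p.1 p.2 v

-- "the stack processed one A-recursion at a time": what stackLoopF is reduced to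
def pvFold (L : List String) : List (Int × Int) → List (List Bool) → Int → Int
  | [], _, c => c
  | p :: rest, v, c => pvFold L rest (pvCis L p v).2 (c + (pvCis L p v).1)

lemma count_set_true (r : List Bool) (i : Nat) (hi : i < r.length) (h : r[i] = false) :
    (r.set i true).count false + 1 = r.count false := by
  induction r generalizing i with
  | nil => simp at hi
  | cons a t ih =>
    cases i with
    | zero => simp_all
    | succ j =>
      simp only [List.set, List.count_cons]
      have := ih j (by simpa using hi) (by simpa using h)
      omega

lemma falses_set (v : List (List Bool)) (i : Nat) (hi : i < v.length) (r' : List Bool)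
    (h : r'.count false + 1 = (v[i]).count false) :
    pvFalses (v.set i r') + 1 = pvFalses v := by
  induction v generalizing i with
  | nil => simp at hi
  | cons a t ih =>
    cases i with
    | zero => simp_all [pvFalses]; omega
    | succ j =>
      have := ih j (by simpa using hi) (by simpa using h)
      simp only [List.set, pvFalses, List.map_cons, List.sum_cons] at *
      omega

lemma isBad_false_elim (L : List String) (v : List (List Bool)) (x y : Int)
    (hb : isBad L x y v = false) :
    0 ≤ x ∧ 0 ≤ y ∧ x < (L.length : Int) ∧ y < (colsOf L : Int) ∧ visAt v x y = false := by
  simp only [isBad, Bool.or_eq_false_iff, decide_eq_false_iff_not, not_lt, not_le] at hb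
  exact ⟨hb.1.1.1.1.1, hb.1.1.1.1.2, hb.1.1.1.2, hb.1.1.2, hb.2⟩

lemma mark_falses (L : List String) (v : List (List Bool)) (x y : Int)
    (hs : pvShape L v) (hb : isBad L x y v = false) :
    pvFalses (visMark v x y) + 1 = pvFalses v ∧ pvShape L (visMark v x y) := by
  obtain ⟨hx, hy, hxu, hyu, hvis⟩ := isBad_false_elim L v x y hb
  have hi : x.toNat < v.length := by rw [hs.1]; omega
  have hrl : (v[x.toNat]).length = colsOf L := hs.2 _ (List.getElem_mem hi)
  have hj : y.toNat < (v[x.toNat]).length := by rw [hrl]; omega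
  have hget : v[x.toNat][y.toNat] = false := by
    have hv : visAt v x y = v[x.toNat][y.toNat] := by
      rw [visAt, PySem.List.pyGet?_of_nonneg _ hx, List.getElem?_eq_getElem hi,
        Option.getD_some, PySem.List.pyGet?_of_nonneg _ hy, List.getElem?_eq_getElem hj,
        Option.getD_some]
    rw [hv] at hvis; exact hvis
  have hmark : visMark v x y = v.set x.toNat ((v[x.toNat]).set y.toNat true) := by
    simp [visMark, List.getD_eq_getElem?_getD, List.getElem?_eq_getElem hi]
  constructor
  · rw [hmark]
    exact falses_set v x.toNat hi _ (count_set_true _ _ hj hget)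
  · rw [hmark]
    refine ⟨by simpa using hs.1, ?_⟩
    intro r hr
    rcases List.mem_or_eq_of_mem_set hr with h | h
    · exact hs.2 _ h
    · subst h; simpa using hrl

lemma cis_falses (L : List String) (fuel : Nat) : ∀ (x y : Int) (v : List (List Bool)),
    pvShape L v →
    pvShape L (countIslandSizeF L fuel x y v).2 ∧
      pvFalses (countIslandSizeF L fuel x y v).2 ≤ pvFalses v := by
  induction fuel with
  | zero => intro x y v hs; simpa [countIslandSizeF] using hs
  | succ f ih =>
    intro x y v hs
    by_cases hb : isBad L x y v
    · simpa [countIslandSizeF, hb] using hs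
    · obtain ⟨hm, hs0⟩ := mark_falses L v x y hs (by simpa using hb)
      simp only [countIslandSizeF, hb, if_false, Bool.false_eq_true]
      obtain ⟨h1, h1'⟩ := ih (x + 1) y _ hs0
      obtain ⟨h2, h2'⟩ := ih x (y + 1) _ h1
      obtain ⟨h3, h3'⟩ := ih x (y - 1) _ h2
      obtain ⟨h4, h4'⟩ := ih (x - 1) y _ h3
      exact ⟨h4, by omega⟩

lemma cis_fuel (L : List String) (fuel : Nat) : ∀ (fuel' : Nat) (x y : Int) (v : List (List Bool)),
    pvShape L v → pvFalses v < fuel → pvFalses v < fuel' →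
    countIslandSizeF L fuel x y v = countIslandSizeF L fuel' x y v := by
  induction fuel with
  | zero => intro _ _ _ _ _ h; omega
  | succ f ih =>
    intro fuel' x y v hs hf hf'
    cases fuel' with
    | zero => omega
    | succ f' =>
      by_cases hb : isBad L x y v
      · simp [countIslandSizeF, hb]
      · obtain ⟨hm, hs0⟩ := mark_falses L v x y hs (by simpa using hb)
        simp only [countIslandSizeF, hb, if_false, Bool.false_eq_true]
        have e1 := ih f' (x + 1) y (visMark v x y) hs0 (by omega) (by omega)
        obtain ⟨hs1, hle1⟩ := cis_falses L f' (x + 1) y (visMark v x y) hs0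
        have e2 := ih f' x (y + 1) _ hs1 (by omega) (by omega)
        obtain ⟨hs2, hle2⟩ := cis_falses L f' x (y + 1) _ hs1
        have e3 := ih f' x (y - 1) _ hs2 (by omega) (by omega)
        obtain ⟨hs3, hle3⟩ := cis_falses L f' x (y - 1) _ hs2
        have e4 := ih f' (x - 1) y _ hs3 (by omega) (by omega)
        rw [e1, e2, e3, e4]

lemma cis_succ (L : List String) (fuel : Nat) (x y : Int) (v : List (List Bool))
    (hb : isBad L x y v = false) :
    countIslandSizeF L (fuel + 1) x y v =
      (1 + (countIslandSizeF L fuel (x + 1) y (visMark v x y)).1 +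
           (countIslandSizeF L fuel x (y + 1)
             (countIslandSizeF L fuel (x + 1) y (visMark v x y)).2).1 +
           (countIslandSizeF L fuel x (y - 1)
             (countIslandSizeF L fuel x (y + 1)
               (countIslandSizeF L fuel (x + 1) y (visMark v x y)).2).2).1 +
           (countIslandSizeF L fuel (x - 1) y
             (countIslandSizeF L fuel x (y - 1)
               (countIslandSizeF L fuel x (y + 1)
                 (countIslandSizeF L fuel (x + 1) y (visMark v x y)).2).2).2).1,
       (countIslandSizeF L fuel (x - 1) y
         (countIslandSizeF L fuel x (y - 1)
           (countIslandSizeF L fuel x (y + 1)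
             (countIslandSizeF L fuel (x + 1) y (visMark v x y)).2).2).2).2) := by
  simp only [countIslandSizeF, hb, if_false, Bool.false_eq_true]

lemma pvCis_shape_falses (L : List String) (p : Int × Int) (v : List (List Bool))
    (hs : pvShape L v) :
    pvShape L (pvCis L p v).2 ∧ pvFalses (pvCis L p v).2 ≤ pvFalses v :=
  cis_falses L (pvFalses v + 1) p.1 p.2 v hs

lemma pvCis_bad (L : List String) (cx cy : Int) (v : List (List Bool))
    (hb : isBad L cx cy v = true) : pvCis L (cx, cy) v = (0, v) := by
  simp [pvCis, countIslandSizeF, hb]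

-- one sufficient-fuel step of A's recursion, expressed in pvCis itself
lemma pvCis_good (L : List String) (cx cy : Int) (v : List (List Bool))
    (hs : pvShape L v) (hb : isBad L cx cy v = false) :
    ∀ a b c d, a = pvCis L (cx + 1, cy) (visMark v cx cy) → b = pvCis L (cx, cy + 1) a.2 →
      c = pvCis L (cx, cy - 1) b.2 → d = pvCis L (cx - 1, cy) c.2 →
      pvCis L (cx, cy) v = (1 + a.1 + b.1 + c.1 + d.1, d.2) := by
  intro a b c d ha hbb hc hd
  obtain ⟨hm, hs0⟩ := mark_falses L v cx cy hs hb
  obtain ⟨hs1, hle1⟩ := pvCis_shape_falses L (cx + 1, cy) _ hs0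
  rw [← ha] at hs1 hle1
  obtain ⟨hs2, hle2⟩ := pvCis_shape_falses L (cx, cy + 1) _ hs1
  rw [← hbb] at hs2 hle2
  obtain ⟨hs3, hle3⟩ := pvCis_shape_falses L (cx, cy - 1) _ hs2
  rw [← hc] at hs3 hle3
  simp only [pvCis] at ha hbb hc hd ⊢
  rw [cis_succ L (pvFalses v) cx cy v hb,
    show pvFalses v = pvFalses (visMark v cx cy) + 1 by omega, ← ha]
  rw [cis_fuel L (pvFalses (visMark v cx cy) + 1) (pvFalses a.2 + 1) cx (cy + 1) a.2 hs1
    (by omega) (by omega), ← hbb]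
  rw [cis_fuel L (pvFalses (visMark v cx cy) + 1) (pvFalses b.2 + 1) cx (cy - 1) b.2 hs2
    (by omega) (by omega), ← hc]
  rw [cis_fuel L (pvFalses (visMark v cx cy) + 1) (pvFalses c.2 + 1) (cx - 1) cy c.2 hs3
    (by omega) (by omega), ← hd]

lemma stack_sim (L : List String) (fuel : Nat) :
    ∀ (stack : List (Int × Int)) (v : List (List Bool)) (c : Int),
    pvShape L v → stack.length + 4 * pvFalses v < fuel →
    stackLoopF L fuel v c stack = pvFold L stack v c := by
  induction fuel with
  | zero => intro stack v c _ h; omega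
  | succ f ih =>
    intro stack v c hs h
    match stack with
    | [] => simp [stackLoopF, pvFold]
    | (cx, cy) :: rest =>
      by_cases hb : isBad L cx cy v
      · rw [show stackLoopF L (f + 1) v c ((cx, cy) :: rest) = stackLoopF L f v c rest by
          simp [stackLoopF, hb]]
        rw [ih rest v c hs (by simp at h ⊢; omega)]
        simp [pvFold, pvCis_bad L cx cy v hb]
      · have hb' : isBad L cx cy v = false := by simpa using hb
        obtain ⟨hm, hs0⟩ := mark_falses L v cx cy hs hb'
        rw [show stackLoopF L (f + 1) v c ((cx, cy) :: rest) =
            stackLoopF L f (visMark v cx cy) (c + 1)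
              ((cx + 1, cy) :: (cx, cy + 1) :: (cx, cy - 1) :: (cx - 1, cy) :: rest) by
          simp [stackLoopF, hb']]
        rw [ih _ _ _ hs0 (by simp at h ⊢; omega)]
        simp only [pvFold]
        rw [pvCis_good L cx cy v hs hb' _ _ _ _ rfl rfl rfl rfl]
        simp only
        congr 1
        ring

lemma falses_init (n m : Nat) :
    pvFalses ((List.range n).map (fun _ => List.replicate m false)) = n * m := by
  induction n with
  | zero => simp [pvFalses]
  | succ k ih =>
    simp only [List.range_succ, List.map_append, List.map_cons, List.map_nil, pvFalses,
      List.sum_append, List.sum_cons, List.sum_nil] at *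
    simp_all [Nat.succ_mul]

lemma shape_init (L : List String) :
    pvShape L ((List.range L.length).map (fun _ => List.replicate (colsOf L) false)) := by
  constructor
  · simp
  · intro r hr
    simp only [List.mem_map] at hr
    obtain ⟨_, _, rfl⟩ := hr
    simp

-- ===== VERDICT (by name: the statement is the Claim_ definition above) =====
theorem checkSmallIslands_spec : Claim_equal_checkSmallIslands := by
  intro L x y _ _
  unfold Spec_checkSmallIslands checkSmallIslands checkSmallIslands_alt
  by_cases hg : (decide (x < 0) || decide (y < 0) || decide ((L.length : Int) ≤ x) ||
      decide ((colsOf L : Int) ≤ y)) = true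
  · simp [hg]
  · simp only [Bool.not_eq_true] at hg
    simp only [hg, Bool.false_eq_true, if_false]
    by_cases h0 : (gridAt L x y == '0') = true
    · simp [h0]
    · simp only [Bool.not_eq_true] at h0
      simp only [h0, Bool.false_eq_true, if_false]
      have hrows : (List.range L.length).map
            (fun _ => (List.range (colsOf L)).map (fun _ => false)) =
          (List.range L.length).map (fun _ => List.replicate (colsOf L) false) := by
        simp [List.map_const']
      rw [hrows]
      set vB := (List.range L.length).map (fun _ => List.replicate (colsOf L) false)
      have hsB : pvShape L vB := shape_init L
      have hfal : pvFalses vB = L.length * colsOf L := falses_init L.length (colsOf L)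
      have hsim := stack_sim L (4 * (L.length * colsOf L) + 2) [(x, y)] vB 0 hsB
        (by simp [hfal]; omega)
      rw [hsim]
      simp only [pvFold, pvCis, zero_add, hfal]
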